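-- pv_equiv track=rewrite | github.com/Shourya3126/finalpict | backup/logic/knowledge_base.py | _detect_offering_type
-- ===== SOURCE A (Python) =====
-- def _detect_offering_type(offering):
--     """
--     Detect the offering type from the offering text.
--     Returns: 'bootcamp', 'talent', 'devtool', or 'general'
--     """
--     if not offering:
--         return "general"
--
--     text = offering.lower()
--
--     bootcamp_keywords = ["bootcamp", "course", "training", "learn", "student",
--                          "placement", "interview prep", "mentorship", "campus",
--                          "certification", "workshop", "curriculum", "teaching"]
--     talent_keywords = ["hire", "hiring", "talent", "recruit", "staffing",
--                       "developer", "engineer", "team", "scale", "on-demand",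
--                       "vetted", "pre-vetted", "join", "joining", "career",
--                       "opportunity", "opening", "vacancy"]
--     devtool_keywords = ["tool", "platform", "saas", "product", "software",
--                        "deploy", "ci/cd", "code review", "integration",
--                        "automate", "workflow", "api"]
--
--     bootcamp_score = sum(1 for kw in bootcamp_keywords if kw in text)
--     talent_score = sum(1 for kw in talent_keywords if kw in text)
--     devtool_score = sum(1 for kw in devtool_keywords if kw in text)
--
--     max_score = max(bootcamp_score, talent_score, devtool_score)
--     if max_score == 0:
--         return "general"
--
--     if bootcamp_score == max_score:
--         return "bootcamp"
--     elif talent_score == max_score: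
--         return "talent"
--     else:
--         return "devtool"
-- ===== SOURCE B (Python) =====
-- def _detect_offering_type(offering):
--     if not offering:
--         return "general"
--     text = offering.lower()
--     categories = [
--         ("bootcamp", ["bootcamp", "course", "training", "learn", "student",
--                       "placement", "interview prep", "mentorship", "campus",
--                       "certification", "workshop", "curriculum", "teaching"]),
--         ("talent", ["hire", "hiring", "talent", "recruit", "staffing",
--                     "developer", "engineer", "team", "scale", "on-demand",
--                     "vetted", "pre-vetted", "join", "joining", "career",
--                     "opportunity", "opening", "vacancy"]),
--         ("devtool", ["tool", "platform", "saas", "product", "software",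
--                      "deploy", "ci/cd", "code review", "integration",
--                      "automate", "workflow", "api"]),
--     ]
--     # Naive multi-pattern matching: instead of searching the text once per
--     # keyword (42 substring searches), slide over the text a single time and
--     # test each window (one per distinct keyword length) against a hash set
--     # of all keywords, collecting the set of keywords that occur in the text.
--     keywords = {kw for _, kws in categories for kw in kws}
--     lengths = sorted({len(kw) for kw in keywords})
--     matched = set()
--     for i in range(len(text)):
--         for L in lengths:
--             sub = text[i:i + L]
--             if sub in keywords:
--                 matched.add(sub)
--     best, best_label = 0, "general"
--     for label, kws in categories:
--         score = sum(1 for kw in kws if kw in matched)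
--         if score > best:
--             best, best_label = score, label
--     return best_label
-- ===== Notes on version B (the rewrite author's own statement) =====
-- stated objective: alternative
-- what changed: Replaces the per-keyword substring searches (42 'kw in text' scans) by a single sliding-window multi-pattern scan of the text, testing each window against a hash set of all keywords and collecting the set of matched keywords, and replaces max()+if-elif by a strict-greater fold over priority-ordered categories.
import Mathlib
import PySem

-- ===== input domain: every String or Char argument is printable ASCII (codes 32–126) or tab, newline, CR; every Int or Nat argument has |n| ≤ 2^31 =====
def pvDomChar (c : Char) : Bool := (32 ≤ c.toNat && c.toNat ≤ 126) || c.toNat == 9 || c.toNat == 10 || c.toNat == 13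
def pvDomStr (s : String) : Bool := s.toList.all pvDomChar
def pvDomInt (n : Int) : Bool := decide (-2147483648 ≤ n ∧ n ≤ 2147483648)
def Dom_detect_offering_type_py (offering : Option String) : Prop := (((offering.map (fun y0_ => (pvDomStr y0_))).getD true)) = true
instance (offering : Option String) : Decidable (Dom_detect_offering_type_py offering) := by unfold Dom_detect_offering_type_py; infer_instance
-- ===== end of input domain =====

set_option maxRecDepth 8192


-- B replaces A's 42 per-keyword substring searches by a single sliding-window scan of
-- the text against a set of all keywords (collecting the matched keywords), and the
-- max()+if-elif decision by a strict-greater fold over priority-ordered categories.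

-- ===== PORT A =====
def pvBootcampKws : List String :=
  ["bootcamp", "course", "training", "learn", "student",
   "placement", "interview prep", "mentorship", "campus",
   "certification", "workshop", "curriculum", "teaching"]
def pvTalentKws : List String :=
  ["hire", "hiring", "talent", "recruit", "staffing",
   "developer", "engineer", "team", "scale", "on-demand",
   "vetted", "pre-vetted", "join", "joining", "career",
   "opportunity", "opening", "vacancy"]
def pvDevtoolKws : List String :=
  ["tool", "platform", "saas", "product", "software",
   "deploy", "ci/cd", "code review", "integration",
   "automate", "workflow", "api"]

def detect_offering_type_py (offering : Option String) : String :=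
  match offering with
  | none => "general"
  | some off =>
    if off = "" then "general"
    else
      let text := PySem.Str.lower off
      let bootcamp_score :=
        pvBootcampKws.foldl (fun acc kw => if PySem.Str.isIn kw text then acc + 1 else acc) 0
      let talent_score :=
        pvTalentKws.foldl (fun acc kw => if PySem.Str.isIn kw text then acc + 1 else acc) 0
      let devtool_score :=
        pvDevtoolKws.foldl (fun acc kw => if PySem.Str.isIn kw text then acc + 1 else acc) 0
      let max_score := max bootcamp_score (max talent_score devtool_score)
      if max_score = 0 then "general"
      else if bootcamp_score = max_score then "bootcamp"
      else if talent_score = max_score then "talent"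
      else "devtool"

-- ===== PORT B =====
def pvCategories : List (String × List String) :=
  [("bootcamp", pvBootcampKws), ("talent", pvTalentKws), ("devtool", pvDevtoolKws)]
-- keywords = {kw for _, kws in categories for kw in kws}
def pvKeywords : PySem.Set String :=
  PySem.Set.ofList (pvCategories.foldl (fun acc c => acc ++ c.2) [])
-- lengths = sorted({len(kw) for kw in keywords})
def pvLengths : List Int :=
  PySem.List.sorted (PySem.Set.ofList (pvKeywords.map (fun kw => PySem.Str.len kw))) (fun x => x) false
-- sub = text[i:i+L]
def pvSubAt (text : String) (i L : Int) : String :=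
  PySem.Str.slice text (some i) (some (i + L))

def detect_offering_type_py_alt (offering : Option String) : String :=
  match offering with
  | none => "general"
  | some off =>
    if off = "" then "general"
    else
      let text := PySem.Str.lower off
      let matched : PySem.Set String :=
        (PySem.List.pyRange 0 (PySem.Str.len text) 1).foldl
          (fun s i =>
            pvLengths.foldl
              (fun s L =>
                if PySem.Set.contains pvKeywords (pvSubAt text i L)
                then PySem.Set.add s (pvSubAt text i L) else s)
              s)
          PySem.Set.empty
      (pvCategories.foldl
        (fun (best : Nat × String) cat =>
          let score := cat.2.foldl
            (fun acc kw => if PySem.Set.contains matched kw then acc + 1 else acc) 0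
          if best.1 < score then (score, cat.1) else best)
        (0, "general")).2

-- ===== PRECONDITION & SPEC =====
def Spec_detect_offering_type_py (offering : Option String) (out : String) : Prop := out = detect_offering_type_py_alt offering
instance (offering : Option String) (out : String) : Decidable (Spec_detect_offering_type_py offering out) := by unfold Spec_detect_offering_type_py; infer_instance

-- ===== CLAIM (what is proved, stated in full; the proofs are below) =====
def Claim_equal_detect_offering_type_py : Prop := ∀ (offering : Option String), Dom_detect_offering_type_py offering → Spec_detect_offering_type_py offering (detect_offering_type_py offering)

-- ===== LEMMAS AND PROOFS =====

-- Membership in the inner (per-position, over all window lengths) scan fold.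
theorem pv_mem_inner (text : String) (i : Int) (Ls : List Int) (s : PySem.Set String) (x : String) :
    x ∈ Ls.foldl
        (fun s L =>
          if PySem.Set.contains pvKeywords (pvSubAt text i L)
          then PySem.Set.add s (pvSubAt text i L) else s) s
      ↔ x ∈ s ∨ ∃ L ∈ Ls, pvSubAt text i L = x ∧ x ∈ pvKeywords := by
  induction Ls generalizing s with
  | nil => simp
  | cons L Ls ih =>
    simp only [List.foldl_cons]
    by_cases h : PySem.Set.contains pvKeywords (pvSubAt text i L)
    · simp only [h, if_pos, ih, PySem.Set.mem_add]
      constructor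
      · rintro (⟨hx | rfl⟩ | ⟨L', hL', hsub, hkw⟩)
        · exact Or.inl hx
        · exact Or.inr ⟨L, List.mem_cons_self .., rfl, by
            simpa [PySem.Set.contains, List.contains_iff_mem] using h⟩
        · exact Or.inr ⟨L', List.mem_cons_of_mem _ hL', hsub, hkw⟩
      · rintro (hx | ⟨L', hL', hsub, hkw⟩)
        · exact Or.inl (Or.inl hx)
        · rcases List.mem_cons.mp hL' with rfl | hL'
          · exact Or.inl (Or.inr hsub.symm)
          · exact Or.inr ⟨L', hL', hsub, hkw⟩
    · rw [if_neg h, ih]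
      constructor
      · rintro (hx | hrest)
        · exact Or.inl hx
        · exact Or.inr (by rcases hrest with ⟨L', hL', hsub, hkw⟩; exact ⟨L', List.mem_cons_of_mem _ hL', hsub, hkw⟩)
      · rintro (hx | ⟨L', hL', hsub, hkw⟩)
        · exact Or.inl hx
        · rcases List.mem_cons.mp hL' with rfl | hL''
          · exact absurd (by simp [PySem.Set.contains,   hsub, hkw]) h
          · exact Or.inr ⟨L', hL'', hsub, hkw⟩

-- Membership in the outer (over all start positions) scan fold.
theorem pv_mem_outer (text : String) (is : List Int) (s : PySem.Set String) (x : String) :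
    x ∈ is.foldl
        (fun s i =>
          pvLengths.foldl
            (fun s L =>
              if PySem.Set.contains pvKeywords (pvSubAt text i L)
              then PySem.Set.add s (pvSubAt text i L) else s) s) s
      ↔ x ∈ s ∨ ∃ i ∈ is, ∃ L ∈ pvLengths, pvSubAt text i L = x ∧ x ∈ pvKeywords := by
  induction is generalizing s with
  | nil => simp
  | cons i is ih =>
    simp only [List.foldl_cons, ih, pv_mem_inner]
    constructor
    · rintro (⟨hx | ⟨L, hL, hsub, hkw⟩⟩ | ⟨i', hi', rest⟩)
      · exact Or.inl hx
      · exact Or.inr ⟨i, List.mem_cons_self .., L, hL, hsub, hkw⟩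
      · exact Or.inr ⟨i', List.mem_cons_of_mem _ hi', rest⟩
    · rintro (hx | ⟨i', hi', rest⟩)
      · exact Or.inl (Or.inl hx)
      · rcases List.mem_cons.mp hi' with rfl | hi''
        · exact Or.inl (Or.inr rest)
        · exact Or.inr ⟨i', hi'', rest⟩

-- Concrete facts about each keyword: nonempty, its length is a scanned window
-- length, and it is in the keyword set.
theorem pv_kw_facts : ∀ kw ∈ pvBootcampKws ++ pvTalentKws ++ pvDevtoolKws,
    kw.toList ≠ [] ∧ ((kw.toList.length : Int) ∈ pvLengths) ∧ kw ∈ pvKeywords := by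
  decide

theorem pv_lengths_nonneg : ∀ L ∈ pvLengths, 0 ≤ L := by decide

-- A keyword is collected by B's sliding-window scan iff it is a substring of the text.
theorem pv_matched_iff (text kw : String)
    (hne : kw.toList ≠ []) (hlen : ((kw.toList.length : Int) ∈ pvLengths))
    (hkw : kw ∈ pvKeywords) :
    kw ∈ (PySem.List.pyRange 0 (PySem.Str.len text) 1).foldl
        (fun s i =>
          pvLengths.foldl
            (fun s L =>
              if PySem.Set.contains pvKeywords (pvSubAt text i L)
              then PySem.Set.add s (pvSubAt text i L) else s) s)
        PySem.Set.empty
      ↔ PySem.Str.isIn kw text = true := by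
  rw [PySem.Str.isIn_eq, ← PySem.Chars.exists_prefix_drop_iff_isIn, pv_mem_outer]
  constructor
  · rintro (h | ⟨i, hi, L, hL, hsub, -⟩)
    · simp [PySem.Set.empty] at h
    · rcases PySem.List.mem_pyRange_one.mp hi with ⟨h0, -⟩
      refine ⟨i.toNat, ?_⟩
      have hL0 := pv_lengths_nonneg L hL
      have hkl : kw.toList = ((text.toList.drop i.toNat).take ((i+L).toNat - i.toNat)) := by
        rw [← hsub]
        simp only [pvSubAt, PySem.Str.toList_slice, PySem.Chars.slice_eq_listSlice]
        rw [PySem.List.slice_toNat text.toList h0 (by omega)]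
      rw [hkl]
      exact List.take_prefix _ _
  · rintro ⟨j, hpre⟩
    have hjlt : j < text.toList.length := by
      by_contra hge
      rw [List.drop_eq_nil_of_le (by omega)] at hpre
      exact hne (List.prefix_nil.mp hpre)
    refine Or.inr ⟨(j : Int), ?_, (kw.toList.length : Int), hlen, ?_, hkw⟩
    · exact PySem.List.mem_pyRange_one.mpr ⟨by positivity, by rw [PySem.Str.len_eq]; exact_mod_cast hjlt⟩
    · apply String.toList_inj.mp
      simp only [pvSubAt, PySem.Str.toList_slice, PySem.Chars.slice_eq_listSlice]
      rw [PySem.List.slice_natCast_add text.toList j kw.toList.length]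
      exact (List.prefix_iff_eq_take.mp hpre).symm

-- B's per-category count over the matched set equals A's per-category count of
-- substring tests.
theorem pv_score_eq (text : String) (kws : List String)
    (hkws : ∀ kw ∈ kws, kw.toList ≠ [] ∧ ((kw.toList.length : Int) ∈ pvLengths) ∧ kw ∈ pvKeywords) :
    kws.foldl
      (fun acc kw =>
        if PySem.Set.contains
            ((PySem.List.pyRange 0 (PySem.Str.len text) 1).foldl
              (fun s i =>
                pvLengths.foldl
                  (fun s L =>
                    if PySem.Set.contains pvKeywords (pvSubAt text i L)
                    then PySem.Set.add s (pvSubAt text i L) else s) s)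
              PySem.Set.empty) kw
        then acc + 1 else acc) (0 : Nat)
    = kws.foldl (fun acc kw => if PySem.Str.isIn kw text then acc + 1 else acc) (0 : Nat) := by
  apply PySem.List.foldl_congr_mem
  intro acc kw hkw
  rcases hkws kw hkw with ⟨hne, hlen, hmem⟩
  have h := pv_matched_iff text kw hne hlen hmem
  have hco : ∀ (s : PySem.Set String) (x : String), PySem.Set.contains s x = true ↔ x ∈ s := by
    intro s x; simp [PySem.Set.contains]
  by_cases hin : PySem.Str.isIn kw text = true
  · rw [if_pos ((hco _ _).mpr (h.mpr hin)), if_pos hin]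
  · rw [if_neg (fun hc => hin (h.mp ((hco _ _).mp hc))), if_neg hin]

-- The strict-greater fold over priority-ordered categories equals A's max/if-elif
-- decision, as pure Nat arithmetic.
theorem pv_decision (b t d : Nat) :
    (if max b (max t d) = 0 then "general"
     else if b = max b (max t d) then "bootcamp"
     else if t = max b (max t d) then "talent"
     else "devtool") =
    (if (if (if ((0, "general") : Nat × String).1 < b then ((b, "bootcamp") : Nat × String) else (0, "general")).1 < t
           then ((t, "talent") : Nat × String)
           else (if ((0, "general") : Nat × String).1 < b then ((b, "bootcamp") : Nat × String) else (0, "general"))).1 < d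
       then ((d, "devtool") : Nat × String)
       else (if (if ((0, "general") : Nat × String).1 < b then ((b, "bootcamp") : Nat × String) else (0, "general")).1 < t
               then ((t, "talent") : Nat × String)
               else (if ((0, "general") : Nat × String).1 < b then ((b, "bootcamp") : Nat × String) else (0, "general")))).2 := by
  have h1 : t ≤ max t d := Nat.le_max_left t d
  have h2 : d ≤ max t d := Nat.le_max_right t d
  have h3 : b ≤ max b (max t d) := Nat.le_max_left _ _
  have h4 : max t d ≤ max b (max t d) := Nat.le_max_right _ _
  have h5 := max_choice b (max t d)
  have h6 := max_choice t d
  set m2 := max t d with hm2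
  set m := max b m2 with hm
  clear_value m2 m
  split_ifs <;> simp only [] <;> first | rfl | omega

-- ===== VERDICT (by name: the statement is the Claim_ definition above) =====
theorem detect_offering_type_py_spec : Claim_equal_detect_offering_type_py := by
  intro offering _
  unfold Spec_detect_offering_type_py detect_offering_type_py detect_offering_type_py_alt
  cases offering with
  | none => rfl
  | some off =>
    by_cases h : off = ""
    · subst h; rfl
    · simp only [h, if_false]
      have hfacts := pv_kw_facts
      simp only [pvCategories, List.foldl_cons, List.foldl_nil]
      rw [pv_score_eq _ pvBootcampKws (fun kw hk => hfacts kw (by simp [hk])),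
          pv_score_eq _ pvTalentKws (fun kw hk => hfacts kw (by simp [hk])),
          pv_score_eq _ pvDevtoolKws (fun kw hk => hfacts kw (by simp [hk]))]
      exact pv_decision _ _ _
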